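-- pv_equiv track=rewrite | github.com/yongchao98/AutoTAMP | openai_func.py | check_syntactic_correct_inverse_order
-- ===== SOURCE A (Python) =====
-- import copy
--
-- def is_unary_operator(token):
--   return token in ('negation', 'globally', 'finally') or token.split(' ')[0] in ('globally', 'finally', 'negation')
--
-- def is_operator(token):
--   return token in ('and', 'imply', 'equal', 'or', 'until', 'negation', 'globally', 'finally') \
--          or token.split(' ')[0] in ('globally', 'finally', 'until')
--
-- def check_syntactic_correct_inverse_order(converted_list_input):
--   converted_list = copy.deepcopy(converted_list_input)
--   converted_list.reverse()
--   count = 0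
--   for item in converted_list:
--     if is_operator(item):
--       if is_unary_operator(item):
--         pass
--       else:
--         count -= 1
--         if count == 0:
--           return 'error'
--     elif item[:4] == 'prop' or item[:5] == 'enter' or item[:4] == 'not_':
--       count += 1
--       if count == 0:
--         return 'error'
--     else:
--       return 'error'
--   if count == 1:
--     return 'correct'
--   else:
--     return 'error'
-- ===== SOURCE B (Python) =====
-- def _delta(token):
--     head = token.split(' ')[0]
--     if (token in ('and', 'imply', 'equal', 'or', 'until', 'negation', 'globally', 'finally')
--             or head in ('globally', 'finally', 'until')):
--         if token in ('negation', 'globally', 'finally') or head in ('globally', 'finally', 'negation'):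
--             return 0      # unary operator: no stack effect
--         return -1         # binary operator: consumes one net operand
--     if token[:4] == 'prop' or token[:5] == 'enter' or token[:4] == 'not_':
--         return 1          # operand
--     return None           # unknown token
--
--
-- def check_syntactic_correct_inverse_order(converted_list_input):
--     deltas = [_delta(t) for t in converted_list_input]
--     if None in deltas:
--         return 'error'
--     total = sum(deltas)
--     prefix = 0
--     for d in deltas:
--         if d != 0 and prefix == total:
--             return 'error'
--         prefix += d
--     return 'correct' if total == 1 else 'error'
-- ===== Notes on version B (the rewrite author's own statement) =====
-- stated objective: alternative
-- what changed: A reverses the list and scans it with a stateful counter and early returns; B classifies each token once into a stack delta (+1 operand, -1 binary, 0 unary, None unknown), then decides the result in one forward pass by comparing running prefix sums against the total.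
import Mathlib
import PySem

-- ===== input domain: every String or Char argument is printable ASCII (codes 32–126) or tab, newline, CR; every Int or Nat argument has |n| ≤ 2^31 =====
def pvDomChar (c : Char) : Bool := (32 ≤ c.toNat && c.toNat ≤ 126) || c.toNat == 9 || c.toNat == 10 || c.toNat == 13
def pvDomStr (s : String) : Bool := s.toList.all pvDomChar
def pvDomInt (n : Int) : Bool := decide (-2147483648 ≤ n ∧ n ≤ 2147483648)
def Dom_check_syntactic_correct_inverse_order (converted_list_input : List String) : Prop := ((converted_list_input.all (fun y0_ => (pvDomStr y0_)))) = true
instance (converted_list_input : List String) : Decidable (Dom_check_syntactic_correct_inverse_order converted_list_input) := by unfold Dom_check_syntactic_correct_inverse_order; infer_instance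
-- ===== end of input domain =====

-- B replaces A's reverse-then-scan stateful counter by one forward pass over per-token
-- stack deltas with a running prefix sum (objective: simpler/alternative, same asymptotic cost).

-- ===== PORT A =====
-- token.split(' ')[0]; split with a nonempty separator always returns at least one piece, so [0] is headD
def pvHead (token : String) : String := ((PySem.Str.split? token " ").getD []).headD ""

def is_unary_operator (token : String) : Bool :=
  (token == "negation" || token == "globally" || token == "finally")
  || (pvHead token == "globally" || pvHead token == "finally" || pvHead token == "negation")

def is_operator (token : String) : Bool :=
  (token == "and" || token == "imply" || token == "equal" || token == "or" || token == "until"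
    || token == "negation" || token == "globally" || token == "finally")
  || (pvHead token == "globally" || pvHead token == "finally" || pvHead token == "until")

-- the for-loop over the reversed list, state = count; early returns become result values
def pvGoA : List String → Int → String
  | [], count => if count = 1 then "correct" else "error"
  | item :: rest, count =>
    if is_operator item then
      if is_unary_operator item then pvGoA rest count
      else if count - 1 = 0 then "error" else pvGoA rest (count - 1)
    else if PySem.Str.slice item none (some 4) == "prop"
         || PySem.Str.slice item none (some 5) == "enter"
         || PySem.Str.slice item none (some 4) == "not_" then
      if count + 1 = 0 then "error" else pvGoA rest (count + 1)
    else "error"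

def check_syntactic_correct_inverse_order (converted_list_input : List String) : String :=
  pvGoA converted_list_input.reverse 0

-- ===== PORT B =====
-- _delta: classify one token: some 0 = unary operator, some (-1) = binary operator, some 1 = operand, none = unknown
def pvDelta (token : String) : Option Int :=
  if (token == "and" || token == "imply" || token == "equal" || token == "or" || token == "until"
      || token == "negation" || token == "globally" || token == "finally")
     || (pvHead token == "globally" || pvHead token == "finally" || pvHead token == "until") then
    if (token == "negation" || token == "globally" || token == "finally")
       || (pvHead token == "globally" || pvHead token == "finally" || pvHead token == "negation") then
      some 0
    else some (-1)
  else if PySem.Str.slice token none (some 4) == "prop"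
       || PySem.Str.slice token none (some 5) == "enter"
       || PySem.Str.slice token none (some 4) == "not_" then
    some 1
  else none

-- the forward loop over deltas with the running prefix sum, plus the final total check
def pvGoB (total : Int) : List Int → Int → String
  | [], _ => if total = 1 then "correct" else "error"
  | d :: ds, pre => if d ≠ 0 ∧ pre = total then "error" else pvGoB total ds (pre + d)

def check_syntactic_correct_inverse_order_alt (converted_list_input : List String) : String :=
  let deltas := converted_list_input.map pvDelta
  if deltas.contains none then "error"
  else
    -- all deltas are proven ≠ none here; extract the ints (Python's list holds plain ints)
    let ds := deltas.map (fun o => o.getD 0)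
    pvGoB ds.sum ds 0

-- ===== PRECONDITION & SPEC =====
def Spec_check_syntactic_correct_inverse_order (converted_list_input : List String) (out : String) : Prop := out = check_syntactic_correct_inverse_order_alt converted_list_input
instance (converted_list_input : List String) (out : String) : Decidable (Spec_check_syntactic_correct_inverse_order converted_list_input out) := by unfold Spec_check_syntactic_correct_inverse_order; infer_instance

-- ===== CLAIM (what is proved, stated in full; the proofs are below) =====
def Claim_equal_check_syntactic_correct_inverse_order : Prop := ∀ (converted_list_input : List String), Dom_check_syntactic_correct_inverse_order converted_list_input → Spec_check_syntactic_correct_inverse_order converted_list_input (check_syntactic_correct_inverse_order converted_list_input)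

-- ===== LEMMAS AND PROOFS =====

-- A's loop, re-expressed over the classified tokens
def pvAEval : List (Option Int) → Int → String
  | [], c => if c = 1 then "correct" else "error"
  | none :: _, _ => "error"
  | some d :: es, c => if d ≠ 0 ∧ c + d = 0 then "error" else pvAEval es (c + d)

lemma pvDelta_eq (t : String) :
    pvDelta t = if is_operator t then (if is_unary_operator t then some 0 else some (-1))
      else if PySem.Str.slice t none (some 4) == "prop"
           || PySem.Str.slice t none (some 5) == "enter"
           || PySem.Str.slice t none (some 4) == "not_" then some 1
      else none := rfl

lemma pvGoA_eq_aEval (ts : List String) : ∀ c, pvGoA ts c = pvAEval (ts.map pvDelta) c := by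
  induction ts with
  | nil => intro c; rfl
  | cons t ts ih =>
    intro c
    rw [List.map_cons, pvDelta_eq]
    by_cases hop : is_operator t
    · by_cases hun : is_unary_operator t
      · simp [pvGoA, pvAEval, hop, hun, ih c]
      · have h1 : (c - 1 = 0) ↔ ((-1 : Int) ≠ 0 ∧ c + -1 = 0) := by omega
        have h2 : c - 1 = c + -1 := by omega
        simp only [pvGoA, pvAEval, hop, hun, if_true, if_false, Bool.false_eq_true]
        rw [h2] at h1 ⊢
        by_cases h : c + -1 = 0 <;> simp [h, ih]
    · by_cases hpr : (PySem.Str.slice t none (some 4) == "prop"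
         || PySem.Str.slice t none (some 5) == "enter"
         || PySem.Str.slice t none (some 4) == "not_") = true
      · have h1 : (c + 1 = 0) ↔ ((1 : Int) ≠ 0 ∧ c + 1 = 0) := by omega
        simp only [pvGoA, pvAEval, hop, hpr, if_true, if_false, Bool.false_eq_true]
        by_cases h : c + 1 = 0 <;> simp [h, ih]
      · simp [pvGoA, pvAEval, hop, hpr]

lemma pvAEval_none (es : List (Option Int)) : ∀ c, none ∈ es → pvAEval es c = "error" := by
  induction es with
  | nil => intro c h; cases h
  | cons e es ih =>
    intro c h
    cases e with
    | none => rfl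
    | some d =>
      have : none ∈ es := by simpa using h
      by_cases hc : d ≠ 0 ∧ c + d = 0 <;> simp [pvAEval, hc, ih _ this]

-- the "count never becomes 0 after a nonzero step" part of A's loop, isolated
def pvNoZero : List Int → Int → Bool
  | [], _ => true
  | d :: ds, c => (decide (d = 0) || !decide (c + d = 0)) && pvNoZero ds (c + d)

lemma pvAEval_some (ds : List Int) : ∀ c,
    pvAEval (ds.map some) c
      = if pvNoZero ds c && decide (c + ds.sum = 1) then "correct" else "error" := by
  induction ds with
  | nil => intro c; by_cases h : c = 1 <;> simp [pvAEval, pvNoZero, h]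
  | cons d ds ih =>
    intro c
    rw [List.map_cons]
    by_cases hc : d ≠ 0 ∧ c + d = 0
    · have : (decide (d = 0) || !decide (c + d = 0)) = false := by
        simp [hc.1, hc.2]
      simp [pvAEval, hc, pvNoZero]
    · have hpass : (decide (d = 0) || !decide (c + d = 0)) = true := by
        by_cases h1 : d = 0 <;> by_cases h2 : c + d = 0 <;> simp_all
      have hsum : c + (d :: ds).sum = (c + d) + ds.sum := by
        simp [List.sum_cons]; ring
      simp only [pvAEval, hc, if_false, pvNoZero, hpass, Bool.true_and, hsum]
      exact ih (c + d)

lemma pvNoZero_append (xs ys : List Int) : ∀ c,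
    pvNoZero (xs ++ ys) c = (pvNoZero xs c && pvNoZero ys (c + xs.sum)) := by
  induction xs with
  | nil => intro c; simp [pvNoZero]
  | cons x xs ih =>
    intro c
    simp only [List.cons_append, pvNoZero, ih, List.sum_cons, Bool.and_assoc]
    ring_nf

-- B's loop condition, isolated
def pvBLoop (total : Int) : List Int → Int → Bool
  | [], _ => true
  | d :: ds, p => (decide (d = 0) || !decide (p = total)) && pvBLoop total ds (p + d)

lemma pvGoB_eq (total : Int) (ds : List Int) : ∀ p,
    pvGoB total ds p
      = if pvBLoop total ds p then (if total = 1 then "correct" else "error") else "error" := by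
  induction ds with
  | nil => intro p; simp [pvGoB, pvBLoop]
  | cons d ds ih =>
    intro p
    by_cases hc : d ≠ 0 ∧ p = total
    · have : (decide (d = 0) || !decide (p = total)) = false := by simp [hc.1, hc.2]
      simp [pvGoB, hc, pvBLoop]
    · have hpass : (decide (d = 0) || !decide (p = total)) = true := by
        by_cases h1 : d = 0 <;> by_cases h2 : p = total <;> simp_all
      simp only [pvGoB, hc, if_false, pvBLoop, hpass, Bool.true_and]
      exact ih (p + d)

-- bridge: scanning the reversed deltas for a zero count = scanning the forward deltas
-- for a prefix sum equal to the total
lemma pvBridge (ds : List Int) : ∀ c p,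
    pvNoZero ds.reverse c = pvBLoop (p + (c + ds.sum)) ds p := by
  induction ds with
  | nil => intro c p; simp [pvNoZero, pvBLoop]
  | cons d ds ih =>
    intro c p
    rw [List.reverse_cons, pvNoZero_append]
    have hT : p + (c + (d :: ds).sum) = (p + d) + (c + ds.sum) := by
      simp [List.sum_cons]; ring
    have hfac : (!decide (c + ds.reverse.sum + d = 0))
        = (!decide ((p : Int) = p + (c + (d :: ds).sum))) := by
      simp only [List.sum_reverse, List.sum_cons]
      congr 1
      rw [decide_eq_decide]
      omega
    have hloop : pvNoZero ds.reverse c = pvBLoop (p + (c + (d :: ds).sum)) ds (p + d) := by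
      rw [hT]; exact ih c (p + d)
    simp only [pvBLoop, pvNoZero, Bool.and_true, hloop, hfac]
    rw [Bool.and_comm]

lemma pvExtract (es : List (Option Int)) (h : ¬ none ∈ es) :
    es = (es.map (fun o => o.getD 0)).map some := by
  induction es with
  | nil => rfl
  | cons e es ih =>
    cases e with
    | none => exact absurd (List.mem_cons_self) h
    | some d =>
      have : ¬ none ∈ es := fun hm => h (List.mem_cons_of_mem _ hm)
      simpa using ih this

-- ===== VERDICT (by name: the statement is the Claim_ definition above) =====
theorem check_syntactic_correct_inverse_order_spec : Claim_equal_check_syntactic_correct_inverse_order := by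
  intro l _hd
  show check_syntactic_correct_inverse_order l = check_syntactic_correct_inverse_order_alt l
  unfold check_syntactic_correct_inverse_order check_syntactic_correct_inverse_order_alt
  rw [pvGoA_eq_aEval, List.map_reverse]
  by_cases h : none ∈ l.map pvDelta
  · have hc : (l.map pvDelta).contains none = true := by
      simpa using h
    rw [pvAEval_none _ _ (by simpa using h)]
    simp only [hc, if_true]
  · have hc : ¬ ((l.map pvDelta).contains none = true) := by
      simpa using h
    have hex := pvExtract (l.map pvDelta) h
    rw [if_neg hc]
    rw [hex, ← List.map_reverse, pvAEval_some, pvGoB_eq]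
    clear hex
    have hb := pvBridge (l.map (fun o => (pvDelta o).getD 0)) 0 0
    simp only [zero_add] at hb
    simp only [List.map_map, Function.comp_def, Option.getD_some] at hb ⊢
    simp only [hb, List.sum_reverse, zero_add]
    by_cases h1 : pvBLoop ((l.map fun o => (pvDelta o).getD 0).sum)
        (l.map fun o => (pvDelta o).getD 0) 0 <;>
      by_cases h2 : ((l.map fun o => (pvDelta o).getD 0).sum) = 1 <;>
      simp [h1, h2]
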